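-- pv_equiv track=rewrite | github.com/franciscoqv/categorization-tree-builder | dataset.py | _checkDataCorrectness
-- ===== SOURCE A (Python) =====
-- def _checkDataCorrectness(dataByLines):
--     # The amount of comas in the first line should be equal to all the others
--     # Assumption of the CSV file: there are no commas within a datapoint
--     commasCount = dataByLines[0].count(',')
--
--     # If there are no commas (i.e. only one or none columns), return False
--     if commasCount == 0:
--         return False
--
--     for datapoint in dataByLines:
--         # Check that all the lines have the same amount of columns
--         if commasCount != datapoint.count(','):
--             # If any single commas' count is different to the initial commas' count
--             return False
--
--         # Also check that no element is empty (i.e. "")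
--         splitData = datapoint.split(',')
--
--         for element in splitData:
--             if len(element) == 0:
--                 return False
--
--
--     return True
-- ===== SOURCE B (Python) =====
-- def _checkDataCorrectness(dataByLines):
--     commasCount = dataByLines[0].count(',')
--     if commasCount == 0:
--         return False
--     return all(
--         line.count(',') == commasCount
--         and not line.startswith(',')
--         and not line.endswith(',')
--         and ',,' not in line
--         for line in dataByLines
--     )
-- ===== Notes on version B (the rewrite author's own statement) =====
-- stated objective: simpler
-- what changed: Replaces the split-into-fields-and-scan inner loop with a single string-boundary test (startswith ',', endswith ',', ',,' substring) inside one all(...) pass, so no field list is ever built.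
import Mathlib
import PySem

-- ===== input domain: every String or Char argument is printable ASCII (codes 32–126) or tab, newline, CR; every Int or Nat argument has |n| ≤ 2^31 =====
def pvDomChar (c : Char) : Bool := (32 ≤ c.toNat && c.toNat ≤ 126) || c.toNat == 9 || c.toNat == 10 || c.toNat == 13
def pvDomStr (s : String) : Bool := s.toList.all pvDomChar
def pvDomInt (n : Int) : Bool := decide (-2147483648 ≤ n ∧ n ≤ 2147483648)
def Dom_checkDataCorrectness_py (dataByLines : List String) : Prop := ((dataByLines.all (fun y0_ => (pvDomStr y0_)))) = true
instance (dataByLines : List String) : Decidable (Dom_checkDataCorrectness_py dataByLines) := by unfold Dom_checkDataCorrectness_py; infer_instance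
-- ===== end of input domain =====

-- B replaces A's split-and-scan emptiness test by a string-boundary test in one pass (objective: simpler).

-- ===== PORT A =====
-- inner loop: 'for element in splitData: if len(element) == 0: return False' (true = no empty element)
def aFields : List String → Bool
  | [] => true
  | e :: rest => if PySem.Str.len e == 0 then false else aFields rest

-- outer loop over the lines
def aLoop (commasCount : Nat) : List String → Bool
  | [] => true
  | d :: rest =>
    if commasCount != PySem.Str.count d "," then false
    else if !aFields ((PySem.Str.split? d ",").getD []) then false
    else aLoop commasCount rest

def checkDataCorrectness_py (dataByLines : List String) : Bool :=
  match dataByLines with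
  | [] => false      -- Python raises IndexError here; excluded by Pre_
  | first :: _ =>
    let commasCount := PySem.Str.count first ","
    if commasCount == 0 then false
    else aLoop commasCount dataByLines

-- ===== PORT B =====
def bLineOk (commasCount : Nat) (line : String) : Bool :=
  PySem.Str.count line "," == commasCount
    && !PySem.Str.startswith line ","
    && !PySem.Str.endswith line ","
    && !PySem.Str.isIn ",," line

def checkDataCorrectness_py_alt (dataByLines : List String) : Bool :=
  match dataByLines with
  | [] => false      -- Python raises IndexError here; excluded by Pre_
  | first :: _ =>
    let commasCount := PySem.Str.count first ","
    if commasCount == 0 then false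
    else dataByLines.all (bLineOk commasCount)

-- ===== PRECONDITION & SPEC =====
-- Pre_ excludes only the empty list, on which Python A raises IndexError (dataByLines[0]).
def Pre_checkDataCorrectness_py (dataByLines : List String) : Prop := dataByLines ≠ []
instance (dataByLines : List String) : Decidable (Pre_checkDataCorrectness_py dataByLines) := by unfold Pre_checkDataCorrectness_py; infer_instance
def pvWitness_checkDataCorrectness_py : List String := ["a,b", "c,d"]

def Spec_checkDataCorrectness_py (dataByLines : List String) (out : Bool) : Prop := out = checkDataCorrectness_py_alt dataByLines
instance (dataByLines : List String) (out : Bool) : Decidable (Spec_checkDataCorrectness_py dataByLines out) := by unfold Spec_checkDataCorrectness_py; infer_instance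

-- ===== CLAIM (what is proved, stated in full; the proofs are below) =====
def Claim_equal_checkDataCorrectness_py : Prop := ∀ (dataByLines : List String), Dom_checkDataCorrectness_py dataByLines → Pre_checkDataCorrectness_py dataByLines → Spec_checkDataCorrectness_py dataByLines (checkDataCorrectness_py dataByLines)

-- ===== LEMMAS AND PROOFS =====

-- reference splitter: split on ',' with an accumulated current field
def splitC (cur : List Char) : List Char → List (List Char)
  | [] => [cur]
  | c :: rest => if c = ',' then cur :: splitC [] rest else splitC (cur ++ [c]) rest

theorem go_eq_splitC : ∀ (l : List Char) (fuel : Nat) (cur : List Char) (acc : List (List Char)),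
    l.length < fuel →
    PySem.Chars.splitOn.go [','] fuel l cur acc = acc.reverse ++ splitC cur.reverse l := by
  intro l
  induction l with
  | nil =>
    intro fuel cur acc h
    match fuel, h with
    | (n+1), _ => rw [PySem.Chars.splitOn.go.eq_def]; simp [splitC]
  | cons c rest ih =>
    intro fuel cur acc h
    match fuel, h with
    | (n+1), h =>
      rw [PySem.Chars.splitOn.go.eq_def]
      simp only []
      by_cases hc : c = ','
      · subst hc
        rw [if_pos (by simp [List.isPrefixOf])]
        have hd : List.drop [','].length (',' :: rest) = rest := rfl
        rw [hd, ih n [] (cur.reverse :: acc) (by simpa using h)]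
        simp [splitC]
      · rw [if_neg (by simp [List.isPrefixOf]; exact fun h' => hc h'.symm)]
        rw [ih n (c :: cur) acc (by simpa using h)]
        simp [splitC, hc]

theorem splitOn_comma (l : List Char) : PySem.Chars.splitOn l [','] = splitC [] l := by
  unfold PySem.Chars.splitOn
  rw [go_eq_splitC l (l.length + 1) [] [] (by omega)]
  simp

theorem mem_nil_splitC : ∀ (l cur : List Char),
    ([] ∈ splitC cur l) ↔
      ((cur = [] ∧ (l = [] ∨ [','] <+: l)) ∨ [','] <:+ l ∨ [',', ','] <:+: l) := by
  intro l
  induction l with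
  | nil =>
    intro cur
    simp only [splitC, List.mem_singleton]
    constructor
    · intro h; exact Or.inl ⟨h.symm, by simp⟩
    · rintro (⟨rfl, -⟩ | hs | hi)
      · rfl
      · exact absurd (List.suffix_nil.mp hs) (by simp)
      · exact absurd (List.infix_nil.mp hi) (by simp)
  | cons c rest ih =>
    intro cur
    by_cases hc : c = ','
    · subst hc
      have h1 : [','] <+: (',' :: rest) := ⟨rest, rfl⟩
      have h2 : ([','] <:+ (',' :: rest)) ↔ (rest = [] ∨ [','] <:+ rest) := by
        rw [List.suffix_cons_iff]; simp [eq_comm]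
      have h4 : ([] ∈ splitC cur (',' :: rest)) ↔ ([] = cur ∨ [] ∈ splitC [] rest) := by
        simp [splitC]
      have h3 : ([',', ','] <:+: (',' :: rest)) ↔ ([','] <+: rest ∨ [',', ','] <:+: rest) := by
        rw [List.infix_cons_iff, List.prefix_cons_iff]; simp
      rw [h4, ih, h2, h3]
      constructor
      · rintro (h | (⟨-, (rfl | hp)⟩ | hs | hi))
        · exact Or.inl ⟨h.symm, Or.inr h1⟩
        · exact Or.inr (Or.inl (Or.inl rfl))
        · exact Or.inr (Or.inr (Or.inl hp))
        · exact Or.inr (Or.inl (Or.inr hs))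
        · exact Or.inr (Or.inr (Or.inr hi))
      · rintro (⟨rfl, -⟩ | (rfl | hs) | (hp | hi))
        · exact Or.inl rfl
        · exact Or.inr (Or.inl ⟨rfl, Or.inl rfl⟩)
        · exact Or.inr (Or.inr (Or.inl hs))
        · exact Or.inr (Or.inl ⟨rfl, Or.inr hp⟩)
        · exact Or.inr (Or.inr (Or.inr hi))
    · have hc' : ',' ≠ c := fun h => hc h.symm
      have hne : cur ++ [c] ≠ [] := by simp
      have hcons : (c :: rest : List Char) ≠ [] := by simp
      have hpre' : ¬ ([','] <+: (c :: rest)) := by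
        rw [List.prefix_cons_iff]; simp [hc']
      have h2 : ([','] <:+ (c :: rest)) ↔ [','] <:+ rest := by
        rw [List.suffix_cons_iff]; simp [hc']
      have h3 : ([',', ','] <:+: (c :: rest)) ↔ [',', ','] <:+: rest := by
        rw [List.infix_cons_iff, List.prefix_cons_iff]; simp [hc']
      have h4 : ([] ∈ splitC cur (c :: rest)) ↔ ([] ∈ splitC (cur ++ [c]) rest) := by
        simp [splitC, hc]
      rw [h4, ih, h2, h3]
      constructor
      · rintro (⟨h, -⟩ | hs | hi)
        · exact absurd h hne
        · exact Or.inr (Or.inl hs)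
        · exact Or.inr (Or.inr hi)
      · rintro (⟨-, (h | hp)⟩ | hs | hi)
        · exact absurd h hcons
        · exact absurd hp hpre'
        · exact Or.inr (Or.inl hs)
        · exact Or.inr (Or.inr hi)

theorem aFields_eq_any (parts : List String) :
    aFields parts = !(parts.any (fun e => e.toList.isEmpty)) := by
  induction parts with
  | nil => rfl
  | cons e rest ih =>
    simp only [aFields, List.any_cons]
    by_cases h : e.toList = []
    · simp [PySem.Str.len, h]
    · have he : e ≠ "" := fun he => h (by rw [he]; rfl)
      simp [PySem.Str.len, he, List.isEmpty_iff, h, ih]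

theorem count_ne_zero_ne_nil (d : String) (h : PySem.Str.count d "," ≠ 0) : d.toList ≠ [] := by
  intro hn
  apply h
  simp [PySem.Str.count, hn]
  rfl

-- one line that has passed the comma-count check: A's split-and-scan equals B's boundary test
theorem any_map_empty : ∀ (ps : List (List Char)),
    ((ps.map String.ofList).any (fun e => e.toList.isEmpty)) = decide ([] ∈ ps) := by
  intro ps
  induction ps with
  | nil => rfl
  | cons p t iht =>
    simp only [List.map_cons, List.any_cons, iht, List.mem_cons]
    by_cases hp : p = []
    · simp [hp]
    · simp [hp, List.isEmpty_iff]

theorem line_lemma (d : String) (h : PySem.Str.count d "," ≠ 0) :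
    (!aFields ((PySem.Str.split? d ",").getD []))
      = (PySem.Str.startswith d "," || PySem.Str.endswith d "," || PySem.Str.isIn ",," d) := by
  have hsplit : PySem.Str.split? d "," = some ((PySem.Chars.splitOn d.toList [',']).map String.ofList) := by
    simp [PySem.Str.split?, PySem.Chars.split?]
  rw [hsplit]
  simp only [Option.getD_some, aFields_eq_any, Bool.not_not]
  rw [splitOn_comma, any_map_empty]
  have hne : d.toList ≠ [] := count_ne_zero_ne_nil d h
  have t1 : (",").toList = [','] := rfl
  have t2 : (",,").toList = [',', ','] := rfl
  have key : ([] ∈ splitC [] d.toList) ↔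
      ((PySem.Str.startswith d "," || PySem.Str.endswith d "," || PySem.Str.isIn ",," d) = true) := by
    rw [mem_nil_splitC]
    simp only [Bool.or_eq_true, PySem.Str.startswith_eq, PySem.Str.endswith_eq,
      PySem.Str.isIn_eq, t1, t2, PySem.Chars.startswith_iff, PySem.Chars.endswith_iff,
      PySem.Chars.isIn_iff_infix]
    constructor
    · rintro (⟨-, (hnil | hp)⟩ | hs | hi)
      · exact absurd hnil hne
      · exact Or.inl (Or.inl hp)
      · exact Or.inl (Or.inr hs)
      · exact Or.inr hi
    · rintro ((hp | hs) | hi)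
      · exact Or.inl ⟨trivial, Or.inr hp⟩
      · exact Or.inr (Or.inl hs)
      · exact Or.inr (Or.inr hi)
  rw [decide_eq_decide.mpr key, Bool.decide_eq_true]

theorem loop_eq_all (cc : Nat) (hcc : cc ≠ 0) (xs : List String) :
    aLoop cc xs = xs.all (bLineOk cc) := by
  induction xs with
  | nil => rfl
  | cons d rest ih =>
    by_cases hd : PySem.Str.count d "," = cc
    · have hne : PySem.Str.count d "," ≠ 0 := by rw [hd]; exact hcc
      have h1 : (cc != PySem.Str.count d ",") = false := by rw [hd]; simp
      have h2 : (PySem.Str.count d "," == cc) = true := by rw [hd]; simp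
      simp only [aLoop, List.all_cons, bLineOk, h1, h2, ih, line_lemma d hne]
      rw [if_neg (show ¬((false : Bool) = true) by simp)]
      cases hb : (PySem.Str.startswith d "," || PySem.Str.endswith d "," || PySem.Str.isIn ",," d) with
      | true =>
        rw [if_pos rfl]
        simp only [Bool.or_eq_true] at hb
        rcases hb with (b1 | b2) | b3
        · simp at b1; simp [b1]
        · simp at b2; simp [b2]
        · simp at b3; simp [b3]
      | false =>
        rw [if_neg (show ¬((false : Bool) = true) by simp)]
        simp only [Bool.or_eq_false_iff] at hb
        obtain ⟨⟨b1, b2⟩, b3⟩ := hb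
        simp at b1 b2 b3
        simp [b1, b2, b3]
    · have h1 : (cc != PySem.Str.count d ",") = true := bne_iff_ne.mpr (fun h => hd h.symm)
      have h2 : (PySem.Str.count d "," == cc) = false := beq_eq_false_iff_ne.mpr hd
      simp only [aLoop, List.all_cons, bLineOk, h1, h2]
      simp

-- ===== VERDICT (by name: the statement is the Claim_ definition above) =====
theorem checkDataCorrectness_py_spec : Claim_equal_checkDataCorrectness_py := by
  intro dataByLines _ hpre
  unfold Spec_checkDataCorrectness_py
  match dataByLines with
  | [] => exact absurd rfl hpre
  | first :: rest =>
    by_cases h0 : PySem.Str.count first "," = 0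
    · have h0' : PySem.Chars.count first.toList [','] = 0 := by simpa using h0
      simp [checkDataCorrectness_py, checkDataCorrectness_py_alt, h0']
    · have h0' : ¬ PySem.Chars.count first.toList [','] = 0 := by simpa using h0
      have hl := loop_eq_all _ h0 (first :: rest)
      simp only [List.all_cons] at hl
      simp at hl
      simp [checkDataCorrectness_py, checkDataCorrectness_py_alt, h0', hl]
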